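-- pv_equiv track=rewrite | github.com/Lucanb/Ruled-Based-Programming | Labs/project/script.py | count_ceels
-- ===== SOURCE A (Python) =====
-- def count_ceels(matrix):
--     vii = 0
--     morti = 0
--     for el in matrix:
--         for item in el:
--             if item == 1:
--                 vii = vii + 1
--             else:
--                 morti = morti + 1
--     return morti, vii
-- ===== SOURCE B (Python) =====
-- def count_ceels(matrix):
--     ones = sum(row.count(1) for row in matrix)
--     total = sum(len(row) for row in matrix)
--     return total - ones, ones
-- ===== Notes on version B (the rewrite author's own statement) =====
-- stated objective: simpler
-- what changed: Replaces the single branch-incremented two-counter pass with two aggregations (count of ones and total cell count); the non-ones value is never counted directly but derived as total minus ones.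
import Mathlib
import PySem

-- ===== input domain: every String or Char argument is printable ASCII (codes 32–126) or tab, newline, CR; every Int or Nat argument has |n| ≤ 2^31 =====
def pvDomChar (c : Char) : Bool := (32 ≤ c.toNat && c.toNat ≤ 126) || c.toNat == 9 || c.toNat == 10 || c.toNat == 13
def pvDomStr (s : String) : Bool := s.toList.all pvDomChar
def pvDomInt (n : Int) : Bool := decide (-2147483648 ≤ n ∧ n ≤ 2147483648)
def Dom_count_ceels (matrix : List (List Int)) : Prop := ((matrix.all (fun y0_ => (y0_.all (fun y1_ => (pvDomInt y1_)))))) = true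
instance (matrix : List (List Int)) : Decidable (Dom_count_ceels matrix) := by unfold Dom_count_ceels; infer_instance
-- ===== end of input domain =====

-- B replaces the branch-incremented two-counter pass with two aggregations (ones count and total size) and derives the non-ones by subtraction; objective: simpler.

-- ===== PORT A =====
-- state s = (vii, morti); A returns (morti, vii)
def count_ceels (matrix : List (List Int)) : Int × Int :=
  let st := matrix.foldl
    (fun (s : Int × Int) el =>
      el.foldl (fun (t : Int × Int) item =>
        if item == 1 then (t.1 + 1, t.2) else (t.1, t.2 + 1)) s)
    (0, 0)
  (st.2, st.1)

-- ===== PORT B =====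
def count_ceels_alt (matrix : List (List Int)) : Int × Int :=
  let ones : Int := (matrix.map (fun row => (PySem.List.count row 1 : Int))).sum
  let total : Int := (matrix.map (fun row => (row.length : Int))).sum
  (total - ones, ones)

-- ===== PRECONDITION & SPEC =====
def Spec_count_ceels (matrix : List (List Int)) (out : Int × Int) : Prop := out = count_ceels_alt matrix
instance (matrix : List (List Int)) (out : Int × Int) : Decidable (Spec_count_ceels matrix out) := by unfold Spec_count_ceels; infer_instance

-- ===== CLAIM (what is proved, stated in full; the proofs are below) =====
def Claim_equal_count_ceels : Prop := ∀ (matrix : List (List Int)), Dom_count_ceels matrix → Spec_count_ceels matrix (count_ceels matrix)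

-- ===== LEMMAS AND PROOFS =====
theorem cc_inner (el : List Int) (s : Int × Int) :
    el.foldl (fun (t : Int × Int) item =>
        if item == 1 then (t.1 + 1, t.2) else (t.1, t.2 + 1)) s
    = (s.1 + (el.count 1 : Int), s.2 + ((el.length : Int) - (el.count 1 : Int))) := by
  induction el generalizing s with
  | nil => simp
  | cons x xs ih =>
    simp only [List.foldl_cons, ih, List.count_cons, List.length_cons]
    by_cases h : x = 1 <;> simp [h, Prod.ext_iff] <;> ring

theorem cc_outer (matrix : List (List Int)) (s : Int × Int) :
    matrix.foldl
      (fun (s : Int × Int) el =>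
        el.foldl (fun (t : Int × Int) item =>
          if item == 1 then (t.1 + 1, t.2) else (t.1, t.2 + 1)) s) s
    = (s.1 + (matrix.map (fun row => (row.count 1 : Int))).sum,
       s.2 + (matrix.map (fun row => (row.length : Int))).sum
           - (matrix.map (fun row => (row.count 1 : Int))).sum) := by
  induction matrix generalizing s with
  | nil => simp
  | cons r rs ih =>
    rw [List.foldl_cons, cc_inner, ih]
    simp only [List.map_cons, List.sum_cons, Prod.ext_iff]
    constructor <;> ring

-- ===== VERDICT (by name: the statement is the Claim_ definition above) =====
theorem count_ceels_spec : Claim_equal_count_ceels := by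
  intro matrix _
  unfold Spec_count_ceels count_ceels count_ceels_alt
  simp only [cc_outer, PySem.List.count, Prod.ext_iff]
  constructor <;> ring
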